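-- pv_equiv track=rewrite | github.com/JJModern/Coding-Questions | regionals24_b.py | breakup
-- ===== SOURCE A (Python) =====
-- nums = [0, 1, 2, 3, 4, 3, 2, 1, 0, 7, 8, 9]
--
-- def breakup(left, right, target):
--     islands = []
--     for i in range(left, right + 1):
--         if nums[i] != target:
--             if i == left or nums[i - 1] == target:
--                 islands.append(i)
--             if i == right or nums[i + 1] == target:
--                 islands.append(i)
--
--     return islands
-- ===== SOURCE B (Python) =====
-- nums = [0, 1, 2, 3, 4, 3, 2, 1, 0, 7, 8, 9]
--
-- def breakup(left, right, target):
--     # Recursive run decomposition: skip target elements, otherwise locate the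
--     # whole non-target run [i..j] at once and emit its two endpoints.
--     def runs(i):
--         if i > right:
--             return []
--         if nums[i] == target:
--             return runs(i + 1)
--         j = i
--         while j < right and nums[j + 1] != target:
--             j += 1
--         return [i, j] + runs(j + 1)
--     return runs(left)
-- ===== Notes on version B (the rewrite author's own statement) =====
-- stated objective: alternative
-- what changed: B replaces A's uniform per-index loop with neighbour tests by a recursive run decomposition: it skips over target elements, and when it meets a non-target element it advances an inner scan to the end of that whole run and emits the pair [start, end] at once, recursing after the run.
import Mathlib
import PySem

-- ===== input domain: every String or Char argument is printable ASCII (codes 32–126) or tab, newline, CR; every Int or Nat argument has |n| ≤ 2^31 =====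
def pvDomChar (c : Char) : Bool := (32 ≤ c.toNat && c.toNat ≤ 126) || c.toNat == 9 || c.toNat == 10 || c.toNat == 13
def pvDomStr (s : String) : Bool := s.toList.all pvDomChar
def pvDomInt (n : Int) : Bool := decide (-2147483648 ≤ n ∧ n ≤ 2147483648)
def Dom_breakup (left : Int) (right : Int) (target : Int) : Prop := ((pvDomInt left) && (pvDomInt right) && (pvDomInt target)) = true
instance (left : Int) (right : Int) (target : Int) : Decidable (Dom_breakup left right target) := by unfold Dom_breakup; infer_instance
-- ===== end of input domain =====

-- B replaces the per-index neighbour-testing loop with a recursive run decomposition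
-- (skip targets, scan out each whole non-target run, emit its endpoint pair); same O(n) cost.

-- ===== PORT A =====
-- the module-level global 'nums'
def numsG : List Int := [0, 1, 2, 3, 4, 3, 2, 1, 0, 7, 8, 9]

-- one iteration of A's loop body; 'none' models an IndexError raised by nums[...]
def breakupStep (left : Int) (right : Int) (target : Int)
    (acc : Option (List Int)) (i : Int) : Option (List Int) :=
  match acc with
  | none => none
  | some islands =>
    match PySem.List.pyGet? numsG i with
    | none => none
    | some vi =>
      if vi ≠ target then
        -- i == left or nums[i-1] == target (short-circuit)
        let c1 : Option Bool :=
          if i = left then some true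
          else match PySem.List.pyGet? numsG (i - 1) with
               | none => none
               | some v => some (v = target)
        match c1 with
        | none => none
        | some b1 =>
          let islands1 := if b1 then islands ++ [i] else islands
          -- i == right or nums[i+1] == target (short-circuit)
          let c2 : Option Bool :=
            if i = right then some true
            else match PySem.List.pyGet? numsG (i + 1) with
                 | none => none
                 | some v => some (v = target)
          match c2 with
          | none => none
          | some b2 => some (if b2 then islands1 ++ [i] else islands1)
      else some islands

def breakup (left : Int) (right : Int) (target : Int) : List Int :=
  ((PySem.List.pyRange left (right + 1) 1).foldl (breakupStep left right target) (some [])).getD []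

-- ===== PORT B =====
-- the inner 'while j < right and nums[j + 1] != target: j += 1' loop; fuel bounds the
-- iteration count ((right - j) iterations suffice); 'none' models IndexError
def findEndB (right target : Int) : Nat → Int → Option Int
  | 0, j => some j
  | n + 1, j =>
    if j < right then
      match PySem.List.pyGet? numsG (j + 1) with
      | none => none
      | some v => if v ≠ target then findEndB right target n (j + 1) else some j
    else some j

-- the recursive helper 'runs(i)'; fuel bounds the recursion depth; 'none' models IndexError
def runsB (left right target : Int) : Nat → Int → Option (List Int)
  | 0, _ => some []
  | n + 1, i =>
    if i > right then some []
    else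
      match PySem.List.pyGet? numsG i with
      | none => none
      | some v =>
        if v = target then runsB left right target n (i + 1)
        else
          match findEndB right target (right - i).toNat i with
          | none => none
          | some j =>
            match runsB left right target n (j + 1) with
            | none => none
            | some rest => some (i :: j :: rest)

def breakup_alt (left : Int) (right : Int) (target : Int) : List Int :=
  (runsB left right target (right + 1 - left).toNat left).getD []

-- ===== PRECONDITION & SPEC =====
-- Pre_ excludes exactly the inputs where A raises IndexError: a nonempty range whose
-- indices leave [-12, 11] (beyond Python's negative-index reach into the 12-element nums).
def Pre_breakup (left : Int) (right : Int) (target : Int) : Prop :=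
  right < left ∨ (-12 ≤ left ∧ right ≤ 11)
instance (left : Int) (right : Int) (target : Int) : Decidable (Pre_breakup left right target) := by
  unfold Pre_breakup; infer_instance

def pvWitness_breakup : Int × Int × Int := (0, 11, 3)

def Spec_breakup (left : Int) (right : Int) (target : Int) (out : List Int) : Prop := out = breakup_alt left right target
instance (left : Int) (right : Int) (target : Int) (out : List Int) : Decidable (Spec_breakup left right target out) := by unfold Spec_breakup; infer_instance

-- ===== CLAIM (what is proved, stated in full; the proofs are below) =====
def Claim_equal_breakup : Prop := ∀ (left : Int) (right : Int) (target : Int), Dom_breakup left right target → Pre_breakup left right target → Spec_breakup left right target (breakup left right target)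

-- ===== LEMMAS AND PROOFS =====

theorem numsG_get_some (i : Int) (h1 : -12 ≤ i) (h2 : i ≤ 11) :
    ∃ v, PySem.List.pyGet? numsG i = some v := by
  refine ⟨(numsG ++ numsG).getD (i + 12).toNat 0, ?_⟩
  interval_cases i <;> decide

-- convenient total view of nums[m] (used only in hypotheses; in-range indices make it exact)
def gV (target m : Int) : Int := (PySem.List.pyGet? numsG m).getD (target + 1)

-- findEndB returns the end j of the non-target run starting strictly after k
theorem findEnd_spec (right target : Int) (hr : right ≤ 11) :
    ∀ n (k : Int), (right - k).toNat = n → -12 ≤ k → k ≤ right →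
    ∃ j, findEndB right target n k = some j ∧ k ≤ j ∧ j ≤ right ∧
      (∀ m, k < m → m ≤ j → gV target m ≠ target) ∧
      (j = right ∨ gV target (j + 1) = target) := by
  intro n
  induction n with
  | zero =>
    intro k hn h1 h2
    have : k = right := by omega
    exact ⟨k, rfl, le_rfl, by omega, by intro m h h'; omega, Or.inl this⟩
  | succ n ih =>
    intro k hn h1 h2
    have hk : k < right := by omega
    obtain ⟨v, hv⟩ := numsG_get_some (k + 1) (by omega) (by omega)
    by_cases hvt : v = target
    · refine ⟨k, ?_, le_rfl, by omega, by intro m h h'; omega, Or.inr (by simp [gV, hv, hvt])⟩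
      simp [findEndB, hk, hv, hvt]
    · obtain ⟨j, hfe, hkj, hjr, hrun, hend⟩ := ih (k + 1) (by omega) (by omega) (by omega)
      refine ⟨j, ?_, by omega, hjr, ?_, hend⟩
      · simp [findEndB, hk, hv, hvt, hfe]
      · intro m hm hm'
        by_cases hmk : m = k + 1
        · subst hmk; simp [gV, hv]; exact hvt
        · exact hrun m (by omega) hm'

-- A's loop over the interior of a run [i..j], entered just after index i was processed:
-- every interior index appends nothing, the final index j appends j
theorem A_run (left right target i j : Int) (hl : -12 ≤ left) (hli : left ≤ i)
    (hr : right ≤ 11) (hjr : j ≤ right)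
    (hrun : ∀ m, i ≤ m → m ≤ j → gV target m ≠ target)
    (hend : j = right ∨ gV target (j + 1) = target) :
    ∀ n (k : Int), (j - k).toNat = n → i < k → k ≤ j → ∀ acc,
      (PySem.List.pyRange k (j + 1) 1).foldl (breakupStep left right target) (some acc)
        = some (acc ++ [j]) := by
  intro n
  induction n with
  | zero =>
    intro k hn h1 h2 acc
    have hkj : k = j := by omega
    subst hkj
    rw [PySem.List.pyRange_one_cons (by omega), PySem.List.pyRange_one_eq_nil (by omega)]
    obtain ⟨v, hv⟩ := numsG_get_some k (by omega) (by omega)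
    obtain ⟨w, hw⟩ := numsG_get_some (k - 1) (by omega) (by omega)
    have hvt : v ≠ target := by
      have := hrun k (by omega) le_rfl; simpa [gV, hv] using this
    have hwt : w ≠ target := by
      have := hrun (k - 1) (by omega) (by omega); simpa [gV, hw] using this
    have hkl : k ≠ left := by omega
    simp only [List.foldl_cons, List.foldl_nil, breakupStep, hv, hkl, hw, if_neg, hvt,
      ne_eq, not_false_eq_true, if_pos]
    rcases hend with hjr' | hgt
    · simp [hjr', hwt]
    · have hkr : k ≠ right ∨ k = right := by omega
      rcases hkr with hkr | hkr
      · obtain ⟨u, hu⟩ := numsG_get_some (k + 1) (by omega) (by omega)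
        have hut : u = target := by simpa [gV, hu] using hgt
        simp [hkr, hu, hut, hwt]
      · simp [hkr, hwt]
  | succ n ih =>
    intro k hn h1 h2 acc
    have hkj : k < j := by omega
    rw [PySem.List.pyRange_one_cons (by omega)]
    obtain ⟨v, hv⟩ := numsG_get_some k (by omega) (by omega)
    obtain ⟨w, hw⟩ := numsG_get_some (k - 1) (by omega) (by omega)
    obtain ⟨u, hu⟩ := numsG_get_some (k + 1) (by omega) (by omega)
    have hvt : v ≠ target := by
      have := hrun k (by omega) (by omega); simpa [gV, hv] using this
    have hwt : w ≠ target := by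
      have := hrun (k - 1) (by omega) (by omega); simpa [gV, hw] using this
    have hut : u ≠ target := by
      have := hrun (k + 1) (by omega) (by omega); simpa [gV, hu] using this
    have hkl : k ≠ left := by omega
    have hkr : k ≠ right := by omega
    have hstep : breakupStep left right target (some acc) k = some acc := by
      simp [breakupStep, hv, hvt, hkl, hw, hwt, hkr, hu, hut]
    rw [List.foldl_cons, hstep]
    exact ih (k + 1) (by omega) (by omega) (by omega) acc

-- main correspondence: from any index i at which A is not mid-run, A's remaining fold
-- appends exactly what B's runsB computes
theorem main_loop (left right target : Int) (hl : -12 ≤ left) (hr : right ≤ 11) :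
    ∀ fuel, ∀ i : Int, (right + 1 - i).toNat ≤ fuel → left ≤ i → i ≤ right + 1 →
    (i ≤ right → (gV target i = target ∨ i = left ∨ gV target (i - 1) = target)) →
    ∀ acc, ∃ l, runsB left right target fuel i = some l ∧
      (PySem.List.pyRange i (right + 1) 1).foldl (breakupStep left right target) (some acc)
        = some (acc ++ l) := by
  intro fuel
  induction fuel with
  | zero =>
    intro i hfuel h1 h2 _ acc
    have : i = right + 1 := by omega
    subst this
    exact ⟨[], rfl, by rw [PySem.List.pyRange_one_eq_nil (by omega)]; simp⟩
  | succ n ih =>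
    intro i hfuel h1 h2 hH acc
    by_cases hend : i = right + 1
    · subst hend
      refine ⟨[], by simp [runsB], ?_⟩
      rw [PySem.List.pyRange_one_eq_nil (by omega)]; simp
    · have hir : i ≤ right := by omega
      obtain ⟨v, hv⟩ := numsG_get_some i (by omega) (by omega)
      by_cases hvt : v = target
      · -- skip a target element
        obtain ⟨l, hB, hA⟩ := ih (i + 1) (by omega) (by omega) (by omega)
          (fun _ => Or.inr (Or.inr (by simp only [gV, show i + 1 - 1 = i by ring, hv, Option.getD_some]; exact hvt))) acc
        refine ⟨l, ?_, ?_⟩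
        · simp [runsB, show ¬ i > right by omega, hv, hvt, hB]
        · rw [PySem.List.pyRange_one_cons (by omega), List.foldl_cons,
            show breakupStep left right target (some acc) i = some acc by
              simp [breakupStep, hv, hvt]]
          exact hA
      · -- a non-target run starts at i
        have hB1 : i = left ∨ gV target (i - 1) = target := by
          rcases hH hir with h | h | h
          · exact absurd (by simpa [gV, hv] using h) hvt
          · exact Or.inl h
          · exact Or.inr h
        obtain ⟨j, hfe, hij, hjr, hrun', hend'⟩ :=
          findEnd_spec right target hr (right - i).toNat i rfl (by omega) hir
        have hrun : ∀ m, i ≤ m → m ≤ j → gV target m ≠ target := by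
          intro m hm hm'
          rcases eq_or_lt_of_le hm with hmi | hmi
          · subst hmi; simpa [gV, hv] using hvt
          · exact hrun' m hmi hm'
        obtain ⟨rest, hBrest, hArest⟩ := ih (j + 1) (by omega) (by omega) (by omega)
          (fun h => Or.inl (by rcases hend' with h' | h' <;> [omega; simpa using h'])) (acc ++ [i, j])
        refine ⟨i :: j :: rest, ?_, ?_⟩
        · simp [runsB, show ¬ i > right by omega, hv, hvt, hfe, hBrest]
        · rw [PySem.List.pyRange_one_append i (j + 1) (right + 1) (by omega) (by omega),
            List.foldl_append]
          have hfirst : (PySem.List.pyRange i (j + 1) 1).foldl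
              (breakupStep left right target) (some acc) = some (acc ++ [i, j]) := by
            rw [PySem.List.pyRange_one_cons (by omega), List.foldl_cons]
            have hc1 : (if i = left then some true
                else match PySem.List.pyGet? numsG (i - 1) with
                     | none => none
                     | some v => some (decide (v = target))) = some true := by
              rcases hB1 with h | h
              · simp [h]
              · by_cases hil : i = left
                · simp [hil]
                · obtain ⟨w, hw⟩ := numsG_get_some (i - 1) (by omega) (by omega)
                  have : w = target := by simpa [gV, hw] using h
                  simp [hil, hw, this]
            by_cases hij' : i = j
            · -- singleton run: b2 is true, i is appended twice
              subst hij'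
              have hc2 : (if i = right then some true
                  else match PySem.List.pyGet? numsG (i + 1) with
                       | none => none
                       | some v => some (decide (v = target))) = some true := by
                rcases hend' with h | h
                · simp [h]
                · by_cases hirr : i = right
                  · simp [hirr]
                  · obtain ⟨u, hu⟩ := numsG_get_some (i + 1) (by omega) (by omega)
                    have : u = target := by simpa [gV, hu] using h
                    simp [hirr, hu, this]
              have hstep : breakupStep left right target (some acc) i
                  = some (acc ++ [i, i]) := by
                simp only [breakupStep, hv, hvt, ne_eq, not_false_eq_true, if_pos]
                rw [hc1, hc2]; simp
              rw [hstep, PySem.List.pyRange_one_eq_nil (by omega)]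
              simp
            · -- run of length ≥ 2: b2 is false at i, then A_run handles (i, j]
              have hirr : i ≠ right := by omega
              obtain ⟨u, hu⟩ := numsG_get_some (i + 1) (by omega) (by omega)
              have hut : u ≠ target := by
                have := hrun (i + 1) (by omega) (by omega); simpa [gV, hu] using this
              have hstep : breakupStep left right target (some acc) i
                  = some (acc ++ [i]) := by
                simp only [breakupStep, hv, hvt, ne_eq, not_false_eq_true, if_pos]
                rw [hc1]
                simp [hirr, hu, hut]
              rw [hstep]
              have := A_run left right target i j hl h1 hr hjr hrun hend'
                (j - (i + 1)).toNat (i + 1) rfl (by omega) (by omega) (acc ++ [i])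
              simpa using this
          rw [hfirst]
          simpa using hArest

-- ===== VERDICT (by name: the statement is the Claim_ definition above) =====
theorem breakup_spec : Claim_equal_breakup := by
  intro left right target _ hpre
  unfold Spec_breakup
  rcases hpre with h | ⟨h1, h2⟩
  · unfold breakup breakup_alt
    rw [PySem.List.pyRange_one_eq_nil (by omega)]
    have : (right + 1 - left).toNat = 0 := by omega
    rw [this]
    rfl
  · by_cases hlr : right < left
    · unfold breakup breakup_alt
      rw [PySem.List.pyRange_one_eq_nil (by omega)]
      have : (right + 1 - left).toNat = 0 := by omega
      rw [this]
      rfl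
    · obtain ⟨l, hB, hA⟩ := main_loop left right target h1 h2
        (right + 1 - left).toNat left le_rfl le_rfl (by omega)
        (fun _ => Or.inr (Or.inl rfl)) []
      unfold breakup breakup_alt
      rw [hB, hA]
      simp
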